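-- pv_equiv track=rewrite | github.com/aajanki/yle-dl | yledl/titleformatter.py | _remove_genre_prefix
-- ===== SOURCE A (Python) =====
-- def _remove_genre_prefix(title: str) -> str:
--     genre_prefixes = [
--         'Elokuva:',
--         'Kino:',
--         'Kino Klassikko:',
--         'Kino Suomi:',
--         'Kotikatsomo:',
--         'Uusi Kino:',
--         'Dok:',
--         'Dokumenttiprojekti:',
--         'Historia:',
--     ]
--     for prefix in genre_prefixes:
--         if title.startswith(prefix):
--             return title[len(prefix) :].strip()
--     return title
-- ===== SOURCE B (Python) =====
-- _GENRE_PREFIXES = frozenset([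
--     'Elokuva:',
--     'Kino:',
--     'Kino Klassikko:',
--     'Kino Suomi:',
--     'Kotikatsomo:',
--     'Uusi Kino:',
--     'Dok:',
--     'Dokumenttiprojekti:',
--     'Historia:',
-- ])
--
--
-- def _remove_genre_prefix(title: str) -> str:
--     # Each known prefix ends at its only colon, so a match, if any, must be
--     # exactly the segment of the title up to (and including) its first colon.
--     idx = title.find(':')
--     if idx == -1:
--         return title
--     if title[:idx + 1] in _GENRE_PREFIXES:
--         return title[idx + 1:].strip()
--     return title
-- ===== Notes on version B (the rewrite author's own statement) =====
-- stated objective: idiomatic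
-- what changed: The per-prefix startswith loop is gone: B computes the first-colon split point once with title.find(':') and does a single frozenset lookup of title[:idx+1], valid because every known prefix's only colon is terminal.
import Mathlib
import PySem

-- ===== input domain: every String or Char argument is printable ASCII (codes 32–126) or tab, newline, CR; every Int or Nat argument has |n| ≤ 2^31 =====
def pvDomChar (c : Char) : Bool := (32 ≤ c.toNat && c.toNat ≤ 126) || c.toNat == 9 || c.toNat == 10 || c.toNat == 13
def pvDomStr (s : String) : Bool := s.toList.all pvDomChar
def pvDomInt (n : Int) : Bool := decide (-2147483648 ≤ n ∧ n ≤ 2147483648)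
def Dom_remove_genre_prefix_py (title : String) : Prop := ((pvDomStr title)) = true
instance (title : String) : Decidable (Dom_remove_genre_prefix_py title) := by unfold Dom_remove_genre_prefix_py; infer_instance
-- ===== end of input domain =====

-- ===== PORT A =====
-- B replaces A's per-prefix startswith loop by one find(':') plus one set lookup (idiomatic; same cost class).
def pyA_loop (title : String) : List String → String
  | [] => title
  | p :: rest =>
    if PySem.Str.startswith title p then
      PySem.Str.strip (PySem.Str.slice title (some (PySem.Str.len p)) none)
    else pyA_loop title rest

def remove_genre_prefix_py (title : String) : String :=
  pyA_loop title
    ["Elokuva:", "Kino:", "Kino Klassikko:", "Kino Suomi:", "Kotikatsomo:",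
     "Uusi Kino:", "Dok:", "Dokumenttiprojekti:", "Historia:"]

-- ===== PORT B =====
def genrePrefixSet : PySem.Set String :=
  PySem.Set.ofList
    ["Elokuva:", "Kino:", "Kino Klassikko:", "Kino Suomi:", "Kotikatsomo:",
     "Uusi Kino:", "Dok:", "Dokumenttiprojekti:", "Historia:"]

def remove_genre_prefix_py_alt (title : String) : String :=
  let idx := PySem.Str.find title ":"
  if idx = -1 then title
  else if PySem.Set.contains genrePrefixSet (PySem.Str.slice title none (some (idx + 1))) then
    PySem.Str.strip (PySem.Str.slice title (some (idx + 1)) none)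
  else title

-- ===== PRECONDITION & SPEC =====
def Spec_remove_genre_prefix_py (title : String) (out : String) : Prop := out = remove_genre_prefix_py_alt title
instance (title : String) (out : String) : Decidable (Spec_remove_genre_prefix_py title out) := by unfold Spec_remove_genre_prefix_py; infer_instance

-- ===== CLAIM (what is proved, stated in full; the proofs are below) =====
def Claim_equal_remove_genre_prefix_py : Prop := ∀ (title : String), Dom_remove_genre_prefix_py title → Spec_remove_genre_prefix_py title (remove_genre_prefix_py title)

-- ===== LEMMAS AND PROOFS =====

theorem alt_eq (title : String) : remove_genre_prefix_py_alt title =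
    if PySem.Str.find title ":" = -1 then title
    else if PySem.Set.contains genrePrefixSet
        (PySem.Str.slice title none (some (PySem.Str.find title ":" + 1))) then
      PySem.Str.strip (PySem.Str.slice title (some (PySem.Str.find title ":" + 1)) none)
    else title := rfl

-- a singleton list is a prefix of l iff l starts with that element
theorem singleton_prefix_iff {α : Type} (a : α) (l : List α) :
    [a] <+: l ↔ l[0]? = some a := by
  constructor
  · rintro ⟨t, rfl⟩; rfl
  · intro h
    cases l with
    | nil => simp at h
    | cons x xs => simp at h; exact ⟨xs, by simp [h]⟩

-- if p (ending in its only ':') is a prefix of cs, the first ':' of cs sits at p.length - 1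
theorem find_colon_of_prefix (p cs : List Char)
    (hlast : p.getLast? = some ':') (hno : p.dropLast.contains ':' = false)
    (hpre : p <+: cs) :
    PySem.Chars.find cs [':'] = (p.length : Int) - 1 := by
  have hplen : 0 < p.length := by
    cases p with
    | nil => simp at hlast
    | cons x xs => simp
  have hat : cs[p.length - 1]? = some ':' := by
    obtain ⟨t, rfl⟩ := hpre
    rw [List.getElem?_append_left (by omega), ← List.getLast?_eq_getElem?]
    exact hlast
  have hdrop : [':'] <+: cs.drop (p.length - 1) := by
    rw [singleton_prefix_iff]
    simpa using hat
  have hnn : 0 ≤ PySem.Chars.find cs [':'] := by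
    rw [PySem.Chars.find_nonneg_iff]
    exact (List.IsPrefix.isInfix hdrop).trans (List.IsSuffix.isInfix (List.drop_suffix _ _))
  obtain ⟨hfst, hmin⟩ := PySem.Chars.find_spec (s := cs) (sub := [':']) hnn
  set j := (PySem.Chars.find cs [':']).toNat with hj
  have hle : j ≤ p.length - 1 := by
    by_contra hgt
    exact hmin (p.length - 1) (by omega) hdrop
  have hge : ¬ j < p.length - 1 := by
    intro hlt
    have hcsj : cs[j]? = some ':' := by
      rw [singleton_prefix_iff] at hfst
      simpa using hfst
    have hpj : p[j]? = some ':' := by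
      obtain ⟨t, rfl⟩ := hpre
      rw [List.getElem?_append_left (by omega)] at hcsj
      exact hcsj
    have hmem : ':' ∈ p.dropLast := by
      apply List.mem_of_getElem? (i := j)
      rw [List.dropLast_eq_take, List.getElem?_take]
      simp [hlt, hpj]
    simp at hno
    exact hno hmem
  omega

-- the match case, one prefix at a time
theorem match_case (title : String) (p : String)
    (hlast : p.toList.getLast? = some ':')
    (hno : p.toList.dropLast.contains ':' = false)
    (hmem : PySem.Set.contains genrePrefixSet p = true)
    (hsw : PySem.Str.startswith title p = true) :
    PySem.Str.strip (PySem.Str.slice title (some (PySem.Str.len p)) none)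
      = remove_genre_prefix_py_alt title := by
  have hpre : p.toList <+: title.toList := by
    rw [PySem.Str.startswith_eq, PySem.Chars.startswith_iff] at hsw; exact hsw
  have hplen : 0 < p.toList.length := by
    cases hp : p.toList with
    | nil => rw [hp] at hlast; simp at hlast
    | cons x xs => simp
  have hfind' : PySem.Str.find title ":" = (p.toList.length : Int) - 1 := by
    rw [PySem.Str.find_eq]
    have hcol : ":".toList = [':'] := by decide
    rw [hcol]
    exact find_colon_of_prefix _ _ hlast hno hpre
  rw [alt_eq, hfind', if_neg (by omega : ¬ ((p.toList.length : Int) - 1 = -1))]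
  have hb : ((p.toList.length : Int) - 1 + 1) = ((p.toList.length : Nat) : Int) := by omega
  rw [hb]
  have hcand : PySem.Str.slice title none (some ((p.toList.length : Nat) : Int)) = p := by
    apply String.toList_injective
    rw [PySem.Str.toList_slice, PySem.Chars.slice_eq_listSlice, PySem.List.slice_to_natCast]
    exact (List.prefix_iff_eq_take.mp hpre).symm
  rw [hcand, hmem, if_pos rfl, PySem.Str.len_eq]

-- in the no-match case the candidate cannot be any of the prefixes
theorem nomatch_case (title : String)
    (h : ∀ p ∈ ["Elokuva:", "Kino:", "Kino Klassikko:", "Kino Suomi:", "Kotikatsomo:",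
     "Uusi Kino:", "Dok:", "Dokumenttiprojekti:", "Historia:"],
        PySem.Str.startswith title p = false) :
    remove_genre_prefix_py_alt title = title := by
  rw [alt_eq]
  by_cases hneg : PySem.Str.find title ":" = -1
  · rw [if_pos hneg]
  · rw [if_neg hneg]
    have hcandpre : (PySem.Str.slice title none (some (PySem.Str.find title ":" + 1))).toList
        <+: title.toList := by
      have hnn : 0 ≤ PySem.Str.find title ":" := by
        have h1 := PySem.Chars.neg_one_le_find (s := title.toList) (sub := ":".toList)
        rw [PySem.Str.find_eq] at hneg ⊢
        omega
      rw [PySem.Str.toList_slice, PySem.Chars.slice_eq_listSlice]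
      have h1 : PySem.Str.find title ":" + 1
          = (((PySem.Str.find title ":").toNat + 1 : Nat) : Int) := by
        push_cast; omega
      rw [h1, PySem.List.slice_to_natCast]
      exact List.take_prefix _ _
    have hcontains : PySem.Set.contains genrePrefixSet
        (PySem.Str.slice title none (some (PySem.Str.find title ":" + 1))) = false := by
      have hset : (genrePrefixSet : List String)
          = ["Elokuva:", "Kino:", "Kino Klassikko:", "Kino Suomi:", "Kotikatsomo:",
             "Uusi Kino:", "Dok:", "Dokumenttiprojekti:", "Historia:"] := by decide
      rw [Bool.eq_false_iff]
      intro htrue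
      have hmem : (PySem.Str.slice title none (some (PySem.Str.find title ":" + 1)))
          ∈ (genrePrefixSet : List String) := by
        rw [← List.contains_iff_mem]
        exact htrue
      rw [hset] at hmem
      have htrue2 : PySem.Str.startswith title
          (PySem.Str.slice title none (some (PySem.Str.find title ":" + 1))) = true := by
        rw [PySem.Str.startswith_eq, PySem.Chars.startswith_iff]
        exact hcandpre
      rw [h _ hmem] at htrue2
      exact Bool.false_ne_true htrue2
    rw [hcontains]
    simp

-- ===== VERDICT (by name: the statement is the Claim_ definition above) =====
theorem remove_genre_prefix_py_spec : Claim_equal_remove_genre_prefix_py := by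
  intro title _
  unfold Spec_remove_genre_prefix_py remove_genre_prefix_py
  simp only [pyA_loop]
  by_cases h1 : PySem.Str.startswith title "Elokuva:" = true
  · rw [if_pos h1]; exact match_case title "Elokuva:" (by decide) (by decide) (by decide) h1
  rw [if_neg h1]
  by_cases h2 : PySem.Str.startswith title "Kino:" = true
  · rw [if_pos h2]; exact match_case title "Kino:" (by decide) (by decide) (by decide) h2
  rw [if_neg h2]
  by_cases h3 : PySem.Str.startswith title "Kino Klassikko:" = true
  · rw [if_pos h3]; exact match_case title "Kino Klassikko:" (by decide) (by decide) (by decide) h3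
  rw [if_neg h3]
  by_cases h4 : PySem.Str.startswith title "Kino Suomi:" = true
  · rw [if_pos h4]; exact match_case title "Kino Suomi:" (by decide) (by decide) (by decide) h4
  rw [if_neg h4]
  by_cases h5 : PySem.Str.startswith title "Kotikatsomo:" = true
  · rw [if_pos h5]; exact match_case title "Kotikatsomo:" (by decide) (by decide) (by decide) h5
  rw [if_neg h5]
  by_cases h6 : PySem.Str.startswith title "Uusi Kino:" = true
  · rw [if_pos h6]; exact match_case title "Uusi Kino:" (by decide) (by decide) (by decide) h6
  rw [if_neg h6]
  by_cases h7 : PySem.Str.startswith title "Dok:" = true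
  · rw [if_pos h7]; exact match_case title "Dok:" (by decide) (by decide) (by decide) h7
  rw [if_neg h7]
  by_cases h8 : PySem.Str.startswith title "Dokumenttiprojekti:" = true
  · rw [if_pos h8]; exact match_case title "Dokumenttiprojekti:" (by decide) (by decide) (by decide) h8
  rw [if_neg h8]
  by_cases h9 : PySem.Str.startswith title "Historia:" = true
  · rw [if_pos h9]; exact match_case title "Historia:" (by decide) (by decide) (by decide) h9
  rw [if_neg h9]
  refine (nomatch_case title ?_).symm
  intro p hp
  simp only [List.mem_cons, List.not_mem_nil, or_false] at hp
  rcases hp with rfl|rfl|rfl|rfl|rfl|rfl|rfl|rfl|rfl <;> simp_all
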